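-- pv_equiv track=rewrite | github.com/ivanstambuk/sdd-bundle-editor | scripts/migrate-schema-relationships.py | get_field_title
-- ===== SOURCE A (Python) =====
-- def get_field_title(field_name: str) -> str:
--     """Generate a human-readable title from field name."""
--     # Remove common suffixes
--     name = field_name.replace('Ids', '').replace('Id', '')
--     # Split camelCase
--     words = []
--     current = []
--     for char in name:
--         if char.isupper() and current:
--             words.append(''.join(current).lower())
--             current = [char]
--         else:
--             current.append(char)
--     if current:
--         words.append(''.join(current).lower())
--     return ' '.join(words)
-- ===== SOURCE B (Python) =====
-- def get_field_title(field_name: str) -> str: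
--     """Generate a human-readable title from field name."""
--     name = field_name.replace('Ids', '').replace('Id', '')
--     spaced = name[:1] + ''.join(' ' + c if c.isupper() else c for c in name[1:])
--     return spaced.lower()
-- ===== Notes on version B (the rewrite author's own statement) =====
-- stated objective: simpler
-- what changed: Replaces the word-accumulator loop (words/current lists, per-word lowercasing, ' '.join) with a single comprehension that inserts a space before each non-leading uppercase letter and one final lowercasing of the whole string.
import Mathlib
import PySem

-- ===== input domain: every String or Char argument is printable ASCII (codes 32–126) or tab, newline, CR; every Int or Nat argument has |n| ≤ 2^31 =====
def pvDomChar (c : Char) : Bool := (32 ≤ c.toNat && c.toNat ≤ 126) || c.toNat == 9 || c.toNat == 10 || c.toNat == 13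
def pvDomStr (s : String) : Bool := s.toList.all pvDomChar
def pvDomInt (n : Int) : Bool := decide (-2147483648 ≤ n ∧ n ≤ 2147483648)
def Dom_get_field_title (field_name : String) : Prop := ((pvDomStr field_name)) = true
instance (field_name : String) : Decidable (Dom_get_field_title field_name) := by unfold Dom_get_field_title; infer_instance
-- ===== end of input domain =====

-- B replaces A's word-accumulator loop by a one-pass "space before each non-leading uppercase"
-- expansion followed by a single whole-string lowercasing (objective: simpler).

-- ===== PORT A =====
-- one iteration of A's `for char in name` loop over state (words, current)
def aStep (st : List (List Char) × List Char) (c : Char) : List (List Char) × List Char :=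
  if PySem.Chars.isupper c && !st.2.isEmpty then (st.1 ++ [PySem.Chars.lower st.2], [c])
  else (st.1, st.2 ++ [c])

def get_field_title (field_name : String) : String :=
  let name := PySem.Str.replace (PySem.Str.replace field_name "Ids" "") "Id" ""
  let st := name.toList.foldl aStep ([], [])
  let words := if st.2.isEmpty then st.1 else st.1 ++ [PySem.Chars.lower st.2]
  String.mk (PySem.Chars.join [' '] words)

-- ===== PORT B =====
-- `' ' + c if c.isupper() else c` for one character of name[1:]
def bExpand (c : Char) : List Char := if PySem.Chars.isupper c then [' ', c] else [c]

def get_field_title_alt (field_name : String) : String :=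
  let name := PySem.Str.replace (PySem.Str.replace field_name "Ids" "") "Id" ""
  let cs := name.toList
  let spaced := PySem.Chars.slice cs none (some 1) ++ (PySem.Chars.slice cs (some 1) none).flatMap bExpand
  String.mk (PySem.Chars.lower spaced)

-- ===== PRECONDITION & SPEC =====
def Spec_get_field_title (field_name : String) (out : String) : Prop := out = get_field_title_alt field_name
instance (field_name : String) (out : String) : Decidable (Spec_get_field_title field_name out) := by unfold Spec_get_field_title; infer_instance

-- ===== CLAIM (what is proved, stated in full; the proofs are below) =====
def Claim_equal_get_field_title : Prop := ∀ (field_name : String), Dom_get_field_title field_name → Spec_get_field_title field_name (get_field_title field_name)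

-- ===== LEMMAS AND PROOFS =====

-- A's final `words` list together with the `' '.join`, as a function of the remaining input and current word
def aTail (cs : List Char) (cur : List Char) : List Char :=
  let st := cs.foldl aStep ([], cur)
  PySem.Chars.join [' '] (if st.2.isEmpty then st.1 else st.1 ++ [PySem.Chars.lower st.2])

theorem aStep_fst_append (cs : List Char) (ws : List (List Char)) (cur : List Char) :
    cs.foldl aStep (ws, cur) = (ws ++ (cs.foldl aStep ([], cur)).1, (cs.foldl aStep ([], cur)).2) := by
  induction cs generalizing ws cur with
  | nil => simp
  | cons c cs ih =>
    simp only [List.foldl_cons]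
    by_cases h : (PySem.Chars.isupper c && !cur.isEmpty) = true
    · rw [show aStep (ws, cur) c = (ws ++ [PySem.Chars.lower cur], [c]) from by simp [aStep, h],
         show aStep (([] : List (List Char)), cur) c = ([PySem.Chars.lower cur], [c]) from by simp [aStep, h]]
      rw [ih (ws ++ [PySem.Chars.lower cur]) [c], ih [PySem.Chars.lower cur] [c]]
      simp
    · rw [show aStep (ws, cur) c = (ws, cur ++ [c]) from by simp [aStep, h],
         show aStep (([] : List (List Char)), cur) c = ([], cur ++ [c]) from by simp [aStep, h]]
      exact ih ws (cur ++ [c])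

theorem aWords_ne_nil (cs : List Char) (cur : List Char) (h : cur ≠ []) :
    (let st := cs.foldl aStep ([], cur)
     if st.2.isEmpty then st.1 else st.1 ++ [PySem.Chars.lower st.2]) ≠ [] := by
  induction cs generalizing cur with
  | nil => simp [h]
  | cons c cs ih =>
    have hne : cur.isEmpty = false := by simp [h]
    simp only [List.foldl_cons]
    by_cases hu : PySem.Chars.isupper c = true
    · rw [show aStep (([] : List (List Char)), cur) c = ([PySem.Chars.lower cur], [c]) from by
        simp [aStep, hu, hne]]
      rw [aStep_fst_append cs [PySem.Chars.lower cur] [c]]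
      simp only
      split <;> simp
    · rw [show aStep (([] : List (List Char)), cur) c = ([], cur ++ [c]) from by simp [aStep, hu, hne]]
      exact ih (cur ++ [c]) (by simp)

theorem lowerChar_space : PySem.Chars.lowerChar ' ' = ' ' := by decide

theorem aTail_eq (cs : List Char) (cur : List Char) (h : cur ≠ []) :
    aTail cs cur = PySem.Chars.lower (cur ++ cs.flatMap bExpand) := by
  induction cs generalizing cur with
  | nil => simp [aTail, h, PySem.Chars.join_singleton]
  | cons c cs ih =>
    have hne : cur.isEmpty = false := by simp [h]
    by_cases hu : PySem.Chars.isupper c = true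
    · have hstep : List.foldl aStep ([], cur) (c :: cs)
          = ([PySem.Chars.lower cur] ++ (List.foldl aStep ([], [c]) cs).1,
             (List.foldl aStep ([], [c]) cs).2) := by
        simp only [List.foldl_cons]
        rw [show aStep (([] : List (List Char)), cur) c = ([PySem.Chars.lower cur], [c]) from by
          simp [aStep, hu, hne]]
        exact aStep_fst_append cs [PySem.Chars.lower cur] [c]
      have hW := aWords_ne_nil cs [c] (by simp)
      have ihc := ih [c] (by simp)
      unfold aTail at ihc ⊢
      rw [hstep]
      simp only at ihc hW ⊢
      have hflat : (c :: cs).flatMap bExpand = [' ', c] ++ cs.flatMap bExpand := by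
        simp [bExpand, hu]
      rw [hflat]
      have hsplit : (if (List.foldl aStep ([], [c]) cs).2.isEmpty
            then [PySem.Chars.lower cur] ++ (List.foldl aStep ([], [c]) cs).1
            else [PySem.Chars.lower cur] ++ (List.foldl aStep ([], [c]) cs).1
              ++ [PySem.Chars.lower (List.foldl aStep ([], [c]) cs).2])
          = PySem.Chars.lower cur :: (if (List.foldl aStep ([], [c]) cs).2.isEmpty
            then (List.foldl aStep ([], [c]) cs).1
            else (List.foldl aStep ([], [c]) cs).1
              ++ [PySem.Chars.lower (List.foldl aStep ([], [c]) cs).2]) := by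
        split <;> simp
      rw [hsplit]
      rcases hq : (if (List.foldl aStep ([], [c]) cs).2.isEmpty
            then (List.foldl aStep ([], [c]) cs).1
            else (List.foldl aStep ([], [c]) cs).1
              ++ [PySem.Chars.lower (List.foldl aStep ([], [c]) cs).2]) with _ | ⟨q, rest⟩
      · exact absurd hq hW
      · rw [hq] at ihc
        rw [PySem.Chars.join_cons_cons, ihc]
        simp [PySem.Chars.lower, lowerChar_space]
    · have hstep : List.foldl aStep ([], cur) (c :: cs) = List.foldl aStep ([], cur ++ [c]) cs := by
        simp only [List.foldl_cons]
        rw [show aStep (([] : List (List Char)), cur) c = ([], cur ++ [c]) from by simp [aStep, hu, hne]]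
      unfold aTail
      rw [hstep]
      have := ih (cur ++ [c]) (by simp)
      unfold aTail at this
      rw [this]
      simp [bExpand, hu]

-- ===== VERDICT (by name: the statement is the Claim_ definition above) =====
theorem get_field_title_spec : Claim_equal_get_field_title := by
  intro fn _
  unfold Spec_get_field_title get_field_title get_field_title_alt
  simp only
  rcases hcs : (PySem.Str.replace (PySem.Str.replace fn "Ids" "") "Id" "").toList with _ | ⟨c, rest⟩
  · simp [PySem.Chars.join, List.intercalate, PySem.List.slice, PySem.Chars.lower]
  · have hstep : List.foldl aStep ([], []) (c :: rest) = List.foldl aStep ([], [c]) rest := by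
      simp [List.foldl_cons, aStep]
    rw [hstep]
    have hA := aTail_eq rest [c] (by simp)
    unfold aTail at hA
    simp only at hA
    rw [hA]
    rw [PySem.Chars.slice_eq_listSlice, PySem.Chars.slice_eq_listSlice,
      PySem.List.slice_to _ (by norm_num : (0:Int) ≤ 1), PySem.List.slice_from _ (by norm_num : (0:Int) ≤ 1)]
    simp
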